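-- pv_equiv track=rewrite | github.com/avanpo/cryptobin | ciphers/vigenere.py | stagger_join
-- ===== SOURCE A (Python) =====
-- def stagger_join(data, parts):
--     output = []
--     indexes = [0] * len(parts)
--     for line in data:
--         i = len(line)
--         while i > 0:
--             for j, p in enumerate(parts):
--                 if i == 0:
--                     break
--                 output.append(p[indexes[j]])
--                 indexes[j] += 1
--                 i -= 1
--         output.append("\n")
--     return "".join(output)
-- ===== SOURCE B (Python) =====
-- def stagger_join(data, parts):
--     # Slice-and-transpose: compute each part's per-line demand in closed form,
--     # cut one contiguous slice per part, and rebuild the line row by row.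
--     k = len(parts)
--     off = [0] * k
--     pieces = []
--     for line in data:
--         L = len(line)
--         cnts = [(L - j + k - 1) // k for j in range(k)]
--         chunks = [parts[j][off[j]:off[j] + cnts[j]] for j in range(k)]
--         for r in range(cnts[0] if cnts else 0):
--             pieces.append("".join(chunks[j][r] for j in range(min(k, L - r * k))))
--         pieces.append("\n")
--         off = [off[j] + cnts[j] for j in range(k)]
--     return "".join(pieces)
-- ===== Notes on version B (the rewrite author's own statement) =====
-- stated objective: alternative
-- what changed: Replaced A's char-by-char round-robin consumption with mutable per-part pointers (nested while/for-with-break) by a slice-and-transpose algorithm: each part's per-line demand is computed in closed form ((L-j+k-1)//k), one contiguous slice is cut per part, and the line is rebuilt row by row from the slices.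
import Mathlib
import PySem

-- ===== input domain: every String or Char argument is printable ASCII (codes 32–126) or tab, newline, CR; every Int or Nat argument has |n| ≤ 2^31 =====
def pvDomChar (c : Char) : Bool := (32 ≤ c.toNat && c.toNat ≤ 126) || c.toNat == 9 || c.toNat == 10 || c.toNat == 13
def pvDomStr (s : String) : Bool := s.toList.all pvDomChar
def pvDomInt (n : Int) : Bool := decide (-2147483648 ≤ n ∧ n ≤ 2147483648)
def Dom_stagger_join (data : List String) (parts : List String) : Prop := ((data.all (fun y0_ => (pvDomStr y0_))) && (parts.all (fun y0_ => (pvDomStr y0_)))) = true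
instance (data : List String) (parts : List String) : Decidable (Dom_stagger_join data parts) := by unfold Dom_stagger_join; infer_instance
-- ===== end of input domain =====

-- B replaces A's char-by-char round-robin consumption (nested while/for-with-break over mutable
-- per-part pointers) by slice-and-transpose: per line, each part's demand is computed in closed
-- form ((L-j+k-1)//k), one contiguous slice is cut per part, and the line is rebuilt row by row.
-- A's output list of single-char strings is ported as a List Char; "".join at the end is String.ofList (exact).

-- ===== PORT A =====
-- the inner 'for j, p in enumerate(parts): if i == 0: break; …' (ps is the remaining suffix of parts, j its start index)
def stagger_join_for (ps : List String) (j : Nat) (i : Int) (idxs : List Int) (out : List Char) :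
    Option (Int × List Int × List Char) :=
  match ps with
  | [] => some (i, idxs, out)
  | p :: rest =>
    if i = 0 then some (i, idxs, out)
    else
      match PySem.List.pyGet? idxs (j : Int) with      -- indexes[j]
      | none => none
      | some ix =>
        match PySem.Str.pyGet? p ix with               -- p[indexes[j]]  (none = IndexError)
        | none => none
        | some c => stagger_join_for rest (j + 1) (i - 1) (idxs.set j (ix + 1)) (out ++ [c])

-- the 'while i > 0' loop; fuel bounds the number of passes (i drops by ≥ 1 per pass when parts ≠ []);
-- fuel exhaustion with i > 0 (only possible when parts = [], where Python loops forever) yields none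
def stagger_join_while (fuel : Nat) (parts : List String) (i : Int) (idxs : List Int) (out : List Char) :
    Option (List Int × List Char) :=
  match fuel with
  | 0 => if i > 0 then none else some (idxs, out)
  | f + 1 =>
    if i > 0 then
      match stagger_join_for parts 0 i idxs out with
      | none => none
      | some (i', idxs', out') => stagger_join_while f parts i' idxs' out'
    else some (idxs, out)

def stagger_join (data : List String) (parts : List String) : String :=
  let res := data.foldl (fun st line =>
    match st with
    | none => none
    | some (idxs, out) =>
      match stagger_join_while line.toList.length parts (line.toList.length : Int) idxs out with
      | none => none
      | some (idxs', out') => some (idxs', out' ++ ['\n'])) (some (List.replicate parts.length (0 : Int), ([] : List Char)))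
  match res with
  | none => ""
  | some s => String.ofList s.2

-- ===== PORT B =====
-- transliteration of Source B; strings are handled on .toList (the Python slices are PySem.List.slice,
-- total: Python slicing clamps and never raises). The indexings parts[j], off[j], cnts[j] all have
-- j < k = len(parts) = len(off) = len(cnts), always in range, so they are ported as getD.
def stagger_join_alt (data : List String) (parts : List String) : String :=
  let k := parts.length
  let st := data.foldl (fun (st : Option (List Int × List (List Char))) line =>
    match st with
    | none => none
    | some st =>
      let off := st.1
      let L : Nat := line.toList.length
      -- cnts = [(L - j + k - 1) // k for j in range(k)]
      let cnts : List Int := (List.range k).map (fun (j : Nat) =>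
        PySem.Int.floordiv ((L : Int) - (j : Int) + (k : Int) - 1) (k : Int))
      -- chunks = [parts[j][off[j]:off[j] + cnts[j]] for j in range(k)]; j < k, always in range
      let chunks : List (List Char) := (List.range k).map (fun j =>
        PySem.List.slice (parts.getD j "").toList (some (off.getD j 0)) (some (off.getD j 0 + cnts.getD j 0)))
      -- nrows = cnts[0] if cnts else 0; cnts[0] = ceil(L/k) >= 0, so .toNat is exact
      let nrows : Nat := match cnts with | [] => 0 | c :: _ => c.toNat
      -- row r: "".join(chunks[j][r] for j in range(min(k, L - r*k))); j < k = len(chunks), so getD;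
      -- for r < nrows, r*k < L, so the Nat subtraction L - r*k agrees with Python's int arithmetic;
      -- chunks[j][r] may raise IndexError: PySem.List.pyGet?, none propagated
      let pieces := (List.range nrows).foldl (fun (ps : Option (List (List Char))) (r : Nat) =>
        match ps with
        | none => none
        | some ps =>
          match (List.range (min k (L - r * k))).foldl (fun (row : Option (List Char)) (j : Nat) =>
            match row with
            | none => none
            | some row =>
              match PySem.List.pyGet? (chunks.getD j []) (r : Int) with
              | none => none
              | some c => some (row ++ [c])) (some []) with
          | none => none
          | some row => some (ps ++ [row])) (some st.2)
      -- pieces.append("\n"); off = [off[j] + cnts[j] for j in range(k)]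
      match pieces with
      | none => none
      | some pieces =>
        some ((List.range k).map (fun j => off.getD j 0 + cnts.getD j 0), pieces ++ [['\n']]))
    (some (List.replicate k (0 : Int), ([] : List (List Char))))
  match st with
  | none => ""
  | some st => String.ofList st.2.flatten

-- ===== PRECONDITION & SPEC =====
-- number of characters a line of length L demands from part j (k parts): ceil((L-j)/k)
def pvCnt (k L j : Nat) : Nat := (L - j + k - 1) / k

-- exactly the inputs on which Python A returns: parts = [] forces all lines empty (else A loops forever),
-- and each part is long enough for its total demand (else A raises IndexError)
def Pre_stagger_join (data : List String) (parts : List String) : Prop :=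
  (parts = [] → ∀ l ∈ data, l.toList.length = 0) ∧
  ∀ j ∈ List.range parts.length,
    (data.map (fun l => pvCnt parts.length l.toList.length j)).sum ≤ (parts.getD j "").toList.length
instance (data : List String) (parts : List String) : Decidable (Pre_stagger_join data parts) := by
  unfold Pre_stagger_join; infer_instance

def pvWitness_stagger_join : List String × List String := (["ab", "cd"], ["ac", "bd"])

def Spec_stagger_join (data : List String) (parts : List String) (out : String) : Prop := out = stagger_join_alt data parts
instance (data : List String) (parts : List String) (out : String) : Decidable (Spec_stagger_join data parts out) := by unfold Spec_stagger_join; infer_instance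

-- ===== CLAIM (what is proved, stated in full; the proofs are below) =====
def Claim_equal_stagger_join : Prop := ∀ (data : List String) (parts : List String), Dom_stagger_join data parts → Pre_stagger_join data parts → Spec_stagger_join data parts (stagger_join data parts)


-- ===== LEMMAS AND PROOFS =====

-- ---------- generic fold of bstep-style consumption over a list of part indices ----------
def pvStep (parts : List String) (j : Nat) (st : Option (List Int × List Char)) : Option (List Int × List Char) :=
  match st with
  | none => none
  | some (idx, out) =>
    match PySem.List.pyGet? parts (j : Int) with
    | none => none
    | some p =>
      match PySem.List.pyGet? idx (j : Int) with
      | none => none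
      | some ix =>
        match PySem.Str.pyGet? p ix with
        | none => none
        | some c => some (idx.set j (ix + 1), out ++ [c])

def pvF (parts : List String) (js : List Nat) (st : Option (List Int × List Char)) : Option (List Int × List Char) :=
  js.foldl (fun st j => pvStep parts j st) st

theorem pvF_none (parts : List String) (js : List Nat) : pvF parts js none = none := by
  induction js with
  | nil => rfl
  | cons j js ih => simpa [pvF, pvStep] using ih

theorem pvF_singleton (parts : List String) (j : Nat) (st : Option (List Int × List Char)) :
    pvF parts [j] st = pvStep parts j st := rfl

theorem pvF_append (parts : List String) (xs ys : List Nat) (st : Option (List Int × List Char)) :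
    pvF parts (xs ++ ys) st = pvF parts ys (pvF parts xs st) := by
  simp [pvF, List.foldl_append]

-- one for-pass of A = pvStep at indices j, j+1, ... (stops after min r (k - j) steps)
theorem pvForA (parts : List String) : ∀ (ps : List String) (j r : Nat) (idx : List Int) (out : List Char),
    ps = parts.drop j →
    stagger_join_for ps j (r : Int) idx out =
      match pvF parts (List.range' j (min r (parts.length - j))) (some (idx, out)) with
      | none => none
      | some s => some (((r - min r (parts.length - j) : Nat) : Int), s.1, s.2) := by
  intro ps
  induction ps with
  | nil =>
    intro j r idx out hdrop
    have hj : parts.length ≤ j := List.drop_eq_nil_iff.mp hdrop.symm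
    have h0 : min r (parts.length - j) = 0 := by omega
    rw [h0]
    simp only [stagger_join_for, pvF, List.range'_zero, List.foldl_nil, Nat.sub_zero]
  | cons p rest ih =>
    intro j r idx out hdrop
    have hj : j < parts.length := by
      by_contra h
      have h2 : parts.drop j = [] := List.drop_eq_nil_iff.mpr (by omega)
      rw [h2] at hdrop
      exact List.cons_ne_nil _ _ hdrop
    have hpj : PySem.List.pyGet? parts (j : Int) = some p := by
      rw [PySem.List.pyGet?_natCast]
      have h0 : (parts.drop j)[0]? = some p := by rw [<- hdrop]; rfl
      rw [List.getElem?_drop] at h0; simpa using h0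
    have hdrop' : rest = parts.drop (j + 1) := by
      have h3 : parts.drop (j + 1) = (parts.drop j).drop 1 := by rw [List.drop_drop]
      rw [h3, <- hdrop]
      rfl
    cases r with
    | zero =>
      have h0 : min 0 (parts.length - j) = 0 := Nat.zero_min _
      rw [h0]
      simp only [stagger_join_for, pvF, List.range'_zero, List.foldl_nil, Nat.sub_zero,
        Nat.cast_zero, if_pos]
    | succ n =>
      have hne : ((n + 1 : Nat) : Int) ≠ 0 := by positivity
      have hm : min (n + 1) (parts.length - j) = min n (parts.length - (j + 1)) + 1 := by omega
      rw [hm, List.range'_succ]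
      rw [show pvF parts (j :: List.range' (j + 1) (min n (parts.length - (j + 1)))) (some (idx, out)) =
            pvF parts (List.range' (j + 1) (min n (parts.length - (j + 1)))) (pvStep parts j (some (idx, out))) from rfl]
      simp only [stagger_join_for, pvStep, hpj, if_neg hne]
      cases hix : PySem.List.pyGet? idx (j : Int) with
      | none => simp [pvF_none]
      | some ix =>
        simp only [PySem.Str.pyGet?_eq, PySem.Chars.pyGet?_eq_listPyGet?]
        cases hc : PySem.List.pyGet? p.toList ix with
        | none => simp [pvF_none]
        | some c =>
          have hsub : ((n + 1 : Nat) : Int) - 1 = (n : Int) := by push_cast; ring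
          rw [hsub]
          dsimp only
          rw [ih (j + 1) n (idx.set j (ix + 1)) (out ++ [c]) hdrop']
          have harith : (n + 1) - (min n (parts.length - (j + 1)) + 1) = n - min n (parts.length - (j + 1)) := by
            omega
          rw [harith]

-- splitting the j-stream of one line at the first full pass
theorem pvRangeModSplit (k r : Nat) :
    (List.range r).map (· % k) = List.range (min r k) ++ (List.range (r - k)).map (· % k) := by
  by_cases h : r ≤ k
  . have : r - k = 0 := by omega
    rw [this]
    simp only [List.range_zero, List.map_nil, List.append_nil, Nat.min_eq_left h]
    exact (List.map_congr_left (fun t ht => Nat.mod_eq_of_lt (lt_of_lt_of_le (List.mem_range.mp ht) h))).trans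
      (List.map_id' _)
  . have hr : r = k + (r - k) := by omega
    rw [Nat.min_eq_right (by omega)]
    conv_lhs => rw [hr]
    rw [List.range_add, List.map_append]
    congr 1
    . exact (List.map_congr_left (fun t ht => Nat.mod_eq_of_lt (List.mem_range.mp ht))).trans
        (List.map_id' _)
    . rw [List.map_map]
      exact List.map_congr_left (fun t _ => by simp [Nat.add_mod_left])

-- the while loop (parts nonempty) = pvStep over t % k for t = 0, ..., r-1
theorem pvWhileA (parts : List String) (hk : 0 < parts.length) :
    ∀ (fuel r : Nat) (idx : List Int) (out : List Char), r ≤ fuel →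
    stagger_join_while fuel parts (r : Int) idx out =
      pvF parts ((List.range r).map (· % parts.length)) (some (idx, out)) := by
  intro fuel
  induction fuel with
  | zero =>
    intro r idx out hr
    have : r = 0 := by omega
    subst this; rfl
  | succ f ih =>
    intro r idx out hr
    by_cases hr0 : r = 0
    . subst hr0; rfl
    . have hrpos : 0 < r := by omega
      have hpos' : ((r : Nat) : Int) > 0 := by exact_mod_cast hrpos
      have h1 : stagger_join_while (f + 1) parts (r : Int) idx out =
          match stagger_join_for parts 0 (r : Int) idx out with
          | none => none
          | some (i', idxs', out') => stagger_join_while f parts i' idxs' out' := by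
        simp only [stagger_join_while]
        rw [if_pos hpos']
      have hfor : stagger_join_for parts 0 (r : Int) idx out =
          match pvF parts (List.range' 0 (min r (parts.length - 0))) (some (idx, out)) with
          | none => none
          | some s => some (((r - min r (parts.length - 0) : Nat) : Int), s.1, s.2) := by
        have := pvForA parts parts 0 r idx out rfl
        -- pvForA is stated with stagger_join_for's bstep-identical body; but stagger_join_for uses
        -- PySem.Str.pyGet? directly, matching pvStep
        exact this
      rw [h1, hfor]
      rw [show parts.length - 0 = parts.length from rfl]
      rw [pvRangeModSplit parts.length r, pvF_append]
      rw [show List.range' 0 (min r parts.length) = List.range (min r parts.length) from List.range_eq_range'.symm]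
      cases hF : pvF parts (List.range (min r parts.length)) (some (idx, out)) with
      | none => simp [pvF_none]
      | some s =>
        dsimp only
        have hr' : r - min r parts.length ≤ f := by omega
        rw [ih (r - min r parts.length) s.1 s.2 hr']
        have hrk : r - min r parts.length = r - parts.length := by omega
        rw [hrk]

-- ---------- arithmetic of demands and rows ----------
def pvLen (parts : List String) (j : Nat) : Nat := (parts.getD j "").toList.length
def pvCh (parts : List String) (j i : Nat) : Char := (parts.getD j "").toList.getD i ' '
def pvIdx (k : Nat) (m : Nat → Nat) : List Int := (List.range k).map (fun j => ((m j : Nat) : Int))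
def pvRowlen (k L r : Nat) : Nat := min k (L - r * k)
def pvRows (parts : List String) (m : Nat → Nat) (L : Nat) : List (List Char) :=
  (List.range (pvCnt parts.length L 0)).map (fun r =>
    (List.range (pvRowlen parts.length L r)).map (fun j => pvCh parts j (m j + r)))

theorem pvlt_ceil (k n r : Nat) (hk : 0 < k) : r < (n + k - 1) / k ↔ r * k < n := by
  cases n with
  | zero =>
    have h0 : (0 + k - 1) / k = 0 := Nat.div_eq_of_lt (by omega)
    rw [h0]
    simp
  | succ m =>
    have h1 : m + 1 + k - 1 = m + k := by omega
    rw [h1]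
    constructor
    · intro h
      have h2 : r + 1 ≤ (m + k) / k := h
      have h3 : (r + 1) * k ≤ m + k := (Nat.le_div_iff_mul_le hk).mp h2
      have h4 : r * k + k ≤ m + k := by rw [Nat.succ_mul] at h3; omega
      omega
    · intro h
      have h3 : (r + 1) * k ≤ m + k := by rw [Nat.succ_mul]; omega
      exact Nat.lt_of_lt_of_le (Nat.lt_succ_self r) ((Nat.le_div_iff_mul_le hk).mpr h3)

theorem pvlt_cnt (k L j r : Nat) (hk : 0 < k) : r < pvCnt k L j ↔ r * k + j < L := by
  unfold pvCnt
  rw [pvlt_ceil k (L - j) r hk]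
  generalize r * k = p
  omega

theorem pvlt_rowlen (k L r j : Nat) (hk : 0 < k) :
    j < pvRowlen k L r ↔ j < k ∧ r < pvCnt k L j := by
  unfold pvRowlen
  rw [pvlt_cnt k L j r hk]
  generalize r * k = p
  omega

theorem pvcnt_le_zero (k L j : Nat) : pvCnt k L j ≤ pvCnt k L 0 := by
  unfold pvCnt
  exact Nat.div_le_div_right (by omega)

theorem pvL_le (k L : Nat) (hk : 0 < k) : L ≤ pvCnt k L 0 * k := by
  have h := pvlt_cnt k L 0 (pvCnt k L 0) hk
  generalize hp : pvCnt k L 0 * k = p at h ⊢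
  omega

-- grouping the j-stream of one line into rows
theorem pvgrp (k : Nat) (hk : 0 < k) : ∀ (n L : Nat), L ≤ n * k →
    (List.range L).map (· % k) = (List.range n).flatMap (fun r => List.range (pvRowlen k L r)) := by
  intro n
  induction n with
  | zero =>
    intro L hL
    have : L = 0 := by omega
    subst this
    simp
  | succ n ih =>
    intro L hL
    rw [List.range_succ, List.flatMap_append]
    by_cases hL' : L ≤ n * k
    · have h0 : pvRowlen k L n = 0 := by unfold pvRowlen; omega
      rw [ih L hL']
      simp [h0]
    · have hd1 : n * k < L := by omega
      have hd2 : L ≤ n * k + k := by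
        have h : (n + 1) * k = n * k + k := by ring
        omega
      have hLd : L = n * k + (L - n * k) := by omega
      conv_lhs => rw [hLd, List.range_add, List.map_append]
      have hsecond : ((List.range (L - n * k)).map (n * k + ·)).map (· % k) = List.range (L - n * k) := by
        rw [List.map_map]
        calc (List.range (L - n * k)).map ((· % k) ∘ (n * k + ·))
            = (List.range (L - n * k)).map id := List.map_congr_left (by
              intro t ht
              have htk : t < k := by have := List.mem_range.mp ht; omega
              simp [Function.comp, Nat.mul_add_mod, Nat.mod_eq_of_lt htk])
          _ = List.range (L - n * k) := List.map_id _
      rw [hsecond, ih (n * k) le_rfl]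
      have hcongr : (List.range n).flatMap (fun r => List.range (pvRowlen k (n * k) r)) =
          (List.range n).flatMap (fun r => List.range (pvRowlen k L r)) := by
        apply List.flatMap_congr
        intro r hr
        have hrn : r < n := List.mem_range.mp hr
        have hmul : r * k + k ≤ n * k := by
          have := Nat.mul_le_mul_right k (Nat.succ_le_of_lt hrn)
          rw [Nat.succ_mul] at this
          omega
        have h1 : pvRowlen k (n * k) r = k := by unfold pvRowlen; omega
        have h2 : pvRowlen k L r = k := by unfold pvRowlen; omega
        rw [h1, h2]
      rw [hcongr]
      have hlast : pvRowlen k L n = L - n * k := by unfold pvRowlen; omega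
      simp [hlast]

-- ---------- pvIdx access ----------
theorem pvIdx_congr (k : Nat) (m m' : Nat → Nat) (h : ∀ j < k, m j = m' j) : pvIdx k m = pvIdx k m' := by
  unfold pvIdx
  exact List.map_congr_left (fun j hj => by rw [h j (List.mem_range.mp hj)])

theorem pvIdx_get (k : Nat) (m : Nat → Nat) (j : Nat) (hj : j < k) :
    PySem.List.pyGet? (pvIdx k m) (j : Int) = some ((m j : Nat) : Int) := by
  rw [PySem.List.pyGet?_natCast]
  simp [pvIdx, List.getElem?_map, List.getElem?_range, hj]

theorem pvIdx_getD (k : Nat) (m : Nat → Nat) (j : Nat) (hj : j < k) :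
    (pvIdx k m).getD j 0 = ((m j : Nat) : Int) := by
  rw [List.getD_eq_getElem?_getD]
  simp [pvIdx, List.getElem?_map, List.getElem?_range, hj]

theorem pvIdx_set (k : Nat) (m : Nat → Nat) (j : Nat) (hj : j < k) :
    (pvIdx k m).set j (((m j : Nat) : Int) + 1) = pvIdx k (fun i => if i = j then m j + 1 else m i) := by
  apply List.ext_getElem
  · simp [pvIdx]
  · intro i h1 h2
    simp only [pvIdx, List.getElem_set, List.getElem_map, List.getElem_range]
    by_cases hij : i = j
    · subst hij
      simp
    · rw [if_neg (by omega), if_neg hij]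

theorem pvParts_get (parts : List String) (j : Nat) (hj : j < parts.length) :
    PySem.List.pyGet? parts (j : Int) = some (parts.getD j "") := by
  rw [PySem.List.pyGet?_natCast, List.getElem?_eq_getElem hj, List.getD_eq_getElem _ _ hj]

theorem pvStr_get (parts : List String) (j i : Nat) (hj : j < parts.length) (hi : i < pvLen parts j) :
    PySem.Str.pyGet? (parts.getD j "") ((i : Nat) : Int) = some (pvCh parts j i) := by
  unfold pvLen at hi
  simp only [PySem.Str.pyGet?_eq, PySem.Chars.pyGet?_eq_listPyGet?, PySem.List.pyGet?_natCast]
  rw [List.getElem?_eq_getElem hi, pvCh, List.getD_eq_getElem _ _ hi]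

-- ---------- one row on the A side ----------
theorem pvRowA (parts : List String) (m : Nat → Nat) (out : List Char) :
    ∀ (c : Nat), c ≤ parts.length → (∀ j < c, m j < pvLen parts j) →
    pvF parts (List.range c) (some (pvIdx parts.length m, out)) =
      some (pvIdx parts.length (fun j => if j < c then m j + 1 else m j),
            out ++ (List.range c).map (fun j => pvCh parts j (m j))) := by
  intro c
  induction c with
  | zero =>
    intro _ _
    have h := pvIdx_congr parts.length (fun j => if j < 0 then m j + 1 else m j) m (by intro j hj; simp)
    simp [pvF, h]
  | succ c ih =>
    intro hc hb
    rw [List.range_succ, pvF_append, ih (by omega) (fun j hj => hb j (by omega))]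
    have hck : c < parts.length := by omega
    have hmc : (fun j => if j < c then m j + 1 else m j) c = m c := by simp
    rw [pvF_singleton]
    unfold pvStep
    rw [pvParts_get parts c hck]
    dsimp only
    have hval : PySem.List.pyGet? (pvIdx parts.length (fun j => if j < c then m j + 1 else m j)) (c : Int)
        = some ((m c : Nat) : Int) := by
      rw [pvIdx_get parts.length _ c hck]; simp
    rw [hval]
    dsimp only
    rw [pvStr_get parts c (m c) hck (by have := hb c (by omega); omega)]
    dsimp only
    have hset := pvIdx_set parts.length (fun j => if j < c then m j + 1 else m j) c hck
    simp only [lt_self_iff_false, if_false] at hset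
    rw [hset]
    have hfun := pvIdx_congr parts.length
      (fun i => if i = c then m c + 1 else if i < c then m i + 1 else m i)
      (fun j => if j < c + 1 then m j + 1 else m j)
      (by intro j hj; by_cases h1 : j = c <;> by_cases h2 : j < c <;> simp [h1, h2] <;> omega)
    rw [hfun, List.map_append, List.append_assoc]
    rfl

-- ---------- rows accumulation on the A side ----------
theorem pvRowsA (parts : List String) (hk : 0 < parts.length) (L : Nat) :
    ∀ (n : Nat) (m : Nat → Nat) (out : List Char),
    (∀ j < parts.length, m j + pvCnt parts.length L j ≤ pvLen parts j) →
    pvF parts ((List.range n).flatMap (fun r => List.range (pvRowlen parts.length L r))) (some (pvIdx parts.length m, out)) =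
      some (pvIdx parts.length (fun j => m j + min n (pvCnt parts.length L j)),
            out ++ ((List.range n).map (fun r =>
              (List.range (pvRowlen parts.length L r)).map (fun j => pvCh parts j (m j + r)))).flatten) := by
  intro n
  induction n with
  | zero =>
    intro m out hb
    have h := pvIdx_congr parts.length (fun j => m j + min 0 (pvCnt parts.length L j)) m (by intro j hj; simp)
    simp [pvF, h]
  | succ n ih =>
    intro m out hb
    rw [List.range_succ, List.flatMap_append, pvF_append, ih m out hb]
    simp only [List.flatMap_cons, List.flatMap_nil, List.append_nil]
    rw [pvRowA parts (fun j => m j + min n (pvCnt parts.length L j)) _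
        (pvRowlen parts.length L n) (Nat.min_le_left _ _)
        (by intro j hj
            have hj' := (pvlt_rowlen parts.length L n j hk).mp hj
            have h2 := hb j hj'.1
            have hmin : min n (pvCnt parts.length L j) = n := Nat.min_eq_left (Nat.le_of_lt hj'.2)
            show m j + min n (pvCnt parts.length L j) < pvLen parts j
            omega)]
    congr 1
    refine Prod.ext ?_ ?_ <;> dsimp only
    · apply pvIdx_congr
      intro j hj
      by_cases hrow : j < pvRowlen parts.length L n
      · have hj' := (pvlt_rowlen parts.length L n j hk).mp hrow
        have hmin1 : min n (pvCnt parts.length L j) = n := Nat.min_eq_left (Nat.le_of_lt hj'.2)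
        have hmin2 : min (n + 1) (pvCnt parts.length L j) = n + 1 := Nat.min_eq_left hj'.2
        simp only [if_pos hrow]
        omega
      · have hj' : ¬ (j < parts.length ∧ n < pvCnt parts.length L j) :=
          fun h => hrow ((pvlt_rowlen parts.length L n j hk).mpr h)
        have hcnt : pvCnt parts.length L j ≤ n := by
          by_contra h
          exact hj' ⟨hj, by omega⟩
        have hmin1 : min n (pvCnt parts.length L j) = pvCnt parts.length L j := Nat.min_eq_right hcnt
        have hmin2 : min (n + 1) (pvCnt parts.length L j) = pvCnt parts.length L j := Nat.min_eq_right (by omega)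
        simp only [if_neg hrow]
        omega
    · rw [List.map_append, List.flatten_append, List.append_assoc]
      simp only [List.map_cons, List.map_nil, List.flatten_cons, List.flatten_nil, List.append_nil]
      congr 2
      apply List.map_congr_left
      intro j hj
      have hj' := (pvlt_rowlen parts.length L n j hk).mp (List.mem_range.mp hj)
      have hmin : min n (pvCnt parts.length L j) = n := Nat.min_eq_left (Nat.le_of_lt hj'.2)
      show pvCh parts j (m j + min n (pvCnt parts.length L j)) = pvCh parts j (m j + n)
      rw [hmin]

-- ---------- one whole line on the A side ----------
theorem pvAline (parts : List String) (hk : 0 < parts.length) (L : Nat) (m : Nat → Nat) (out : List Char)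
    (hb : ∀ j < parts.length, m j + pvCnt parts.length L j ≤ pvLen parts j) :
    stagger_join_while L parts (L : Int) (pvIdx parts.length m) out =
      some (pvIdx parts.length (fun j => m j + pvCnt parts.length L j), out ++ (pvRows parts m L).flatten) := by
  have h1 := pvWhileA parts hk L L (pvIdx parts.length m) out le_rfl
  rw [h1]
  show pvF parts ((List.range L).map (· % parts.length)) _ = _
  rw [pvgrp parts.length hk (pvCnt parts.length L 0) L (pvL_le parts.length L hk)]
  rw [pvRowsA parts hk L (pvCnt parts.length L 0) m out hb]
  congr 1
  refine Prod.ext ?_ ?_ <;> dsimp only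
  · apply pvIdx_congr
    intro j hj
    have := pvcnt_le_zero parts.length L j
    omega
  · rfl

-- ---------- B-side pieces ----------
theorem pvcnts_eq (k L j : Nat) (hj : j < k) :
    PySem.Int.floordiv ((L : Int) - (j : Int) + (k : Int) - 1) (k : Int) = ((pvCnt k L j : Nat) : Int) := by
  have hk : 0 < k := by omega
  rw [PySem.Int.floordiv_eq_ediv_of_pos (by exact_mod_cast hk)]
  by_cases hjL : j ≤ L
  · have hcast : (L : Int) - (j : Int) + (k : Int) - 1 = ((L - j + k - 1 : Nat) : Int) := by omega
    rw [hcast, ← Int.natCast_ediv]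
    rfl
  · have h1 : pvCnt k L j = 0 := by
      unfold pvCnt
      have : L - j = 0 := by omega
      rw [this]
      exact Nat.div_eq_of_lt (by omega)
    rw [h1]
    have h2 : (0 : Int) ≤ (L : Int) - (j : Int) + (k : Int) - 1 := by omega
    have h3 : (L : Int) - (j : Int) + (k : Int) - 1 < (k : Int) := by omega
    simp [Int.ediv_eq_zero_of_lt h2 h3]

theorem pvdrop_take (xs : List Char) (a c : Nat) (h : a + c ≤ xs.length) :
    (xs.drop a).take c = (List.range c).map (fun r => xs.getD (a + r) ' ') := by
  apply List.ext_getElem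
  · simp only [List.length_take, List.length_drop, List.length_map, List.length_range]
    omega
  · intro i h1 h2
    simp only [List.length_take, List.length_drop] at h1
    simp only [List.length_map, List.length_range] at h2
    simp only [List.getElem_take, List.getElem_drop, List.getElem_map, List.getElem_range]
    rw [List.getD_eq_getElem _ _ (by omega)]

theorem pvchunk_eq (parts : List String) (L : Nat) (m : Nat → Nat) (j : Nat) (hj : j < parts.length)
    (hbj : m j + pvCnt parts.length L j ≤ pvLen parts j) :
    PySem.List.slice (parts.getD j "").toList (some ((m j : Nat) : Int))
        (some (((m j : Nat) : Int) + ((pvCnt parts.length L j : Nat) : Int))) =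
      (List.range (pvCnt parts.length L j)).map (fun r => pvCh parts j (m j + r)) := by
  have hcast : ((m j : Nat) : Int) + ((pvCnt parts.length L j : Nat) : Int)
      = ((m j + pvCnt parts.length L j : Nat) : Int) := by push_cast; ring
  rw [hcast, PySem.List.slice_natCast, Nat.add_sub_cancel_left]
  unfold pvLen at hbj
  rw [pvdrop_take _ _ _ hbj]
  rfl



-- getD on a mapped range
theorem pvmapRange_getD {a : Type} (k : Nat) (f : Nat → a) (j : Nat) (d : a) (hj : j < k) :
    ((List.range k).map f).getD j d = f j := by
  rw [List.getD_eq_getElem?_getD]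
  simp [List.getElem?_map, List.getElem?_range, hj]

-- option-threaded character loop ("".join over a generator that may raise)
theorem pvRowB (g : Nat → Option Char) (f : Nat → Char) :
    ∀ (rl : Nat) (s0 : List Char), (∀ j < rl, g j = some (f j)) →
    (List.range rl).foldl (fun (row : Option (List Char)) (j : Nat) =>
        match row with
        | none => none
        | some row =>
          match g j with
          | none => none
          | some c => some (row ++ [c])) (some s0)
      = some (s0 ++ (List.range rl).map f) := by
  intro rl
  induction rl with
  | zero => intro s0 _; simp
  | succ rl ih =>
    intro s0 hg
    rw [List.range_succ, List.foldl_append, ih s0 (fun j hj => hg j (by omega))]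
    simp only [List.foldl_cons, List.foldl_nil, hg rl (by omega)]
    simp [List.append_assoc]

-- option-threaded row loop (pieces.append(row) where building row may raise)
theorem pvPiecesB (rowO : Nat → Option (List Char)) (rowF : Nat → List Char) :
    ∀ (n : Nat) (ps0 : List (List Char)), (∀ r < n, rowO r = some (rowF r)) →
    (List.range n).foldl (fun (ps : Option (List (List Char))) (r : Nat) =>
        match ps with
        | none => none
        | some ps =>
          match rowO r with
          | none => none
          | some row => some (ps ++ [row])) (some ps0)
      = some (ps0 ++ (List.range n).map rowF) := by
  intro n
  induction n with
  | zero => intro ps0 _; simp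
  | succ n ih =>
    intro ps0 hr
    rw [List.range_succ, List.foldl_append, ih ps0 (fun r hrn => hr r (by omega))]
    simp only [List.foldl_cons, List.foldl_nil, hr n (by omega)]
    simp [List.append_assoc]

-- nrows / headD bookkeeping
theorem pvmatch_headD (l : List Int) :
    (match l with | [] => (0 : Nat) | c :: _ => c.toNat) = (l.headD 0).toNat := by
  cases l <;> rfl

theorem pvIdx_zero (k : Nat) : pvIdx k (fun _ => 0) = List.replicate k (0 : Int) := by
  unfold pvIdx
  simp

-- one whole line on the B side (the literal loop body of the port applied to the abstract state)
theorem pvBline (parts : List String) (hk : 0 < parts.length) (line : String) (m : Nat → Nat)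
    (pieces : List (List Char))
    (hb : ∀ j < parts.length, m j + pvCnt parts.length line.toList.length j ≤ pvLen parts j) :
    (fun (st : Option (List Int × List (List Char))) (line : String) =>
      match st with
      | none => none
      | some st =>
      let off := st.1
      let L : Nat := line.toList.length
      let cnts : List Int := (List.range parts.length).map (fun (j : Nat) =>
        PySem.Int.floordiv ((L : Int) - (j : Int) + (parts.length : Int) - 1) (parts.length : Int))
      let chunks : List (List Char) := (List.range parts.length).map (fun j =>
        PySem.List.slice (parts.getD j "").toList (some (off.getD j 0)) (some (off.getD j 0 + cnts.getD j 0)))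
      let nrows : Nat := match cnts with | [] => 0 | c :: _ => c.toNat
      let pieces := (List.range nrows).foldl (fun (ps : Option (List (List Char))) (r : Nat) =>
        match ps with
        | none => none
        | some ps =>
          match (List.range (min parts.length (L - r * parts.length))).foldl (fun (row : Option (List Char)) (j : Nat) =>
            match row with
            | none => none
            | some row =>
              match PySem.List.pyGet? (chunks.getD j []) (r : Int) with
              | none => none
              | some c => some (row ++ [c])) (some []) with
          | none => none
          | some row => some (ps ++ [row])) (some st.2)
      match pieces with
      | none => none
      | some pieces =>
        some ((List.range parts.length).map (fun j => off.getD j 0 + cnts.getD j 0), pieces ++ [['\n']]))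
      (some (pvIdx parts.length m, pieces)) line
    = some (pvIdx parts.length (fun j => m j + pvCnt parts.length line.toList.length j),
       pieces ++ pvRows parts m line.toList.length ++ [['\n']]) := by
  dsimp only
  have hcnts : (List.range parts.length).map (fun (j : Nat) =>
      PySem.Int.floordiv ((line.toList.length : Int) - (j : Int) + (parts.length : Int) - 1) (parts.length : Int))
      = pvIdx parts.length (fun j => pvCnt parts.length line.toList.length j) := by
    unfold pvIdx
    exact List.map_congr_left (fun j hj =>
      pvcnts_eq parts.length line.toList.length j (List.mem_range.mp hj))
  rw [hcnts]
  have hchunks : (List.range parts.length).map (fun j =>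
      PySem.List.slice (parts.getD j "").toList (some ((pvIdx parts.length m).getD j 0))
        (some ((pvIdx parts.length m).getD j 0 +
          (pvIdx parts.length (fun j => pvCnt parts.length line.toList.length j)).getD j 0)))
      = (List.range parts.length).map (fun j =>
          (List.range (pvCnt parts.length line.toList.length j)).map (fun r => pvCh parts j (m j + r))) := by
    apply List.map_congr_left
    intro j hj
    have hjk := List.mem_range.mp hj
    rw [pvIdx_getD parts.length m j hjk,
        pvIdx_getD parts.length (fun j => pvCnt parts.length line.toList.length j) j hjk]
    exact pvchunk_eq parts line.toList.length m j hjk (hb j hjk)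
  rw [hchunks, pvmatch_headD]
  have hhead : (pvIdx parts.length (fun j => pvCnt parts.length line.toList.length j)).headD 0
      = ((pvCnt parts.length line.toList.length 0 : Nat) : Int) := by
    unfold pvIdx
    obtain ⟨k', hk'⟩ : ∃ k', parts.length = k' + 1 := ⟨parts.length - 1, by omega⟩
    rw [hk', List.range_succ_eq_map]
    rfl
  rw [hhead, Int.toNat_natCast]
  have hrow : ∀ r < pvCnt parts.length line.toList.length 0,
      (List.range (min parts.length (line.toList.length - r * parts.length))).foldl
        (fun (row : Option (List Char)) (j : Nat) =>
          match row with
          | none => none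
          | some row =>
            match PySem.List.pyGet? (((List.range parts.length).map (fun j =>
                (List.range (pvCnt parts.length line.toList.length j)).map
                  (fun r => pvCh parts j (m j + r)))).getD j []) (r : Int) with
            | none => none
            | some c => some (row ++ [c])) (some [])
      = some ((List.range (pvRowlen parts.length line.toList.length r)).map
          (fun j => pvCh parts j (m j + r))) := by
    intro r _
    have h := pvRowB
      (g := fun j => PySem.List.pyGet? (((List.range parts.length).map (fun j =>
          (List.range (pvCnt parts.length line.toList.length j)).map
            (fun r => pvCh parts j (m j + r)))).getD j []) (r : Int))
      (f := fun j => pvCh parts j (m j + r))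
      (pvRowlen parts.length line.toList.length r) []
      (by intro j hj
          have hj' := (pvlt_rowlen parts.length line.toList.length r j hk).mp hj
          dsimp only
          rw [pvmapRange_getD parts.length _ j [] hj'.1]
          rw [PySem.List.pyGet?_natCast, List.getElem?_map, List.getElem?_range hj'.2]
          rfl)
    rw [List.nil_append] at h
    show (List.range (pvRowlen parts.length line.toList.length r)).foldl _ (some []) = _
    exact h
  rw [pvPiecesB
      (rowO := fun r => (List.range (min parts.length (line.toList.length - r * parts.length))).foldl
        (fun (row : Option (List Char)) (j : Nat) =>
          match row with
          | none => none
          | some row =>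
            match PySem.List.pyGet? (((List.range parts.length).map (fun j =>
                (List.range (pvCnt parts.length line.toList.length j)).map
                  (fun r => pvCh parts j (m j + r)))).getD j []) (r : Int) with
            | none => none
            | some c => some (row ++ [c])) (some []))
      (rowF := fun r => (List.range (pvRowlen parts.length line.toList.length r)).map
        (fun j => pvCh parts j (m j + r)))
      (pvCnt parts.length line.toList.length 0) pieces hrow]
  dsimp only
  congr 1
  refine Prod.ext ?_ ?_ <;> dsimp only
  · apply List.map_congr_left
    intro j hj
    have hjk := List.mem_range.mp hj
    rw [pvIdx_getD parts.length m j hjk,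
        pvIdx_getD parts.length (fun j => pvCnt parts.length line.toList.length j) j hjk]
    show ((m j : Nat) : Int) + ((pvCnt parts.length line.toList.length j : Nat) : Int)
      = (((fun j => m j + pvCnt parts.length line.toList.length j) j : Nat) : Int)
    push_cast
    ring
  · unfold pvRows
    rfl

-- ---------- assembled main lemmas (statements reference the ports' literal loop bodies) ----------
theorem pvMain (parts : List String) (hk : 0 < parts.length) :
    ∀ (data : List String) (m : Nat → Nat) (pieces : List (List Char)),
    (∀ j < parts.length, m j + (data.map (fun l => pvCnt parts.length l.toList.length j)).sum ≤ pvLen parts j) →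
    data.foldl (fun st line =>
      match st with
      | none => none
      | some (idxs, out) =>
        match stagger_join_while line.toList.length parts (line.toList.length : Int) idxs out with
        | none => none
        | some (idxs', out') => some (idxs', out' ++ ['\n'])) (some (pvIdx parts.length m, pieces.flatten)) =
      Option.map (fun (s : List Int × List (List Char)) => (s.1, s.2.flatten))
        (data.foldl (fun (st : Option (List Int × List (List Char))) line =>
    match st with
    | none => none
    | some st =>
      let off := st.1
      let L : Nat := line.toList.length
      let cnts : List Int := (List.range parts.length).map (fun (j : Nat) =>
        PySem.Int.floordiv ((L : Int) - (j : Int) + (parts.length : Int) - 1) (parts.length : Int))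
      let chunks : List (List Char) := (List.range parts.length).map (fun j =>
        PySem.List.slice (parts.getD j "").toList (some (off.getD j 0)) (some (off.getD j 0 + cnts.getD j 0)))
      let nrows : Nat := match cnts with | [] => 0 | c :: _ => c.toNat
      let pieces := (List.range nrows).foldl (fun (ps : Option (List (List Char))) (r : Nat) =>
        match ps with
        | none => none
        | some ps =>
          match (List.range (min parts.length (L - r * parts.length))).foldl (fun (row : Option (List Char)) (j : Nat) =>
            match row with
            | none => none
            | some row =>
              match PySem.List.pyGet? (chunks.getD j []) (r : Int) with
              | none => none
              | some c => some (row ++ [c])) (some []) with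
          | none => none
          | some row => some (ps ++ [row])) (some st.2)
      match pieces with
      | none => none
      | some pieces =>
        some ((List.range parts.length).map (fun j => off.getD j 0 + cnts.getD j 0), pieces ++ [['\n']]))
          (some (pvIdx parts.length m, pieces))) := by
  intro data
  induction data with
  | nil =>
    intro m pieces hrem
    rfl
  | cons line rest ih =>
    intro m pieces hrem
    have hbline : ∀ j < parts.length, m j + pvCnt parts.length line.toList.length j ≤ pvLen parts j := by
      intro j hj
      have := hrem j hj
      simp only [List.map_cons, List.sum_cons] at this
      omega
    have hrem' : ∀ j < parts.length,
        (fun j => m j + pvCnt parts.length line.toList.length j) j +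
          (rest.map (fun l => pvCnt parts.length l.toList.length j)).sum ≤ pvLen parts j := by
      intro j hj
      have := hrem j hj
      simp only [List.map_cons, List.sum_cons] at this
      show m j + pvCnt parts.length line.toList.length j +
        (rest.map (fun l => pvCnt parts.length l.toList.length j)).sum ≤ pvLen parts j
      omega
    have hB := pvBline parts hk line m pieces hbline
    have hstepA : (match stagger_join_while line.toList.length parts (line.toList.length : Int)
          (pvIdx parts.length m) pieces.flatten with
        | none => none
        | some (idxs', out') => some (idxs', out' ++ ['\n']))
        = some (pvIdx parts.length (fun j => m j + pvCnt parts.length line.toList.length j),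
            (pieces ++ pvRows parts m line.toList.length ++ [['\n']]).flatten) := by
      rw [pvAline parts hk line.toList.length m pieces.flatten hbline]
      dsimp only
      simp [List.flatten_append, List.append_assoc]
    simp only [List.foldl_cons]
    dsimp only at hB ⊢
    rw [hstepA]
    rw [hB]
    exact ih (fun j => m j + pvCnt parts.length line.toList.length j)
      (pieces ++ pvRows parts m line.toList.length ++ [['\n']]) hrem'

theorem pvNilCase :
    ∀ (data : List String) (pieces : List (List Char)), (∀ l ∈ data, l.toList.length = 0) →
    data.foldl (fun st line =>
      match st with
      | none => none
      | some (idxs, out) =>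
        match stagger_join_while line.toList.length ([] : List String) (line.toList.length : Int) idxs out with
        | none => none
        | some (idxs', out') => some (idxs', out' ++ ['\n'])) (some (([] : List Int), pieces.flatten)) =
      some (([] : List Int), (pieces ++ List.replicate data.length ['\n']).flatten) := by
  intro data
  induction data with
  | nil =>
    intro pieces _
    simp
  | cons line rest ih =>
    intro pieces hall
    have hl : line.toList.length = 0 := hall line (by simp)
    simp only [List.foldl_cons, hl]
    have hstep : (match stagger_join_while 0 ([] : List String) ((0 : Nat) : Int) ([] : List Int) pieces.flatten with
        | none => none
        | some (idxs', out') => some (idxs', out' ++ ['\n']))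
        = some (([] : List Int), (pieces ++ [['\n']]).flatten) := by
      simp [stagger_join_while, List.flatten_append]
    rw [hstep]
    have := ih (pieces ++ [['\n']]) (fun l hl' => hall l (by simp [hl']))
    rw [this]
    congr 1
    simp [List.length_cons, List.replicate_succ, List.append_assoc, List.flatten_append]

-- B's loop body for parts = [] degenerates (range 0 everywhere) to appending one newline piece
theorem pvNilB : ∀ (data : List String) (pieces : List (List Char)),
    data.foldl (fun (st : Option (List Int × List (List Char))) (_ : String) =>
        match st with
        | none => none
        | some s => some (([] : List Int), s.2 ++ [['\n']]))
        (some (([] : List Int), pieces))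
      = some (([] : List Int), pieces ++ List.replicate data.length ['\n']) := by
  intro data
  induction data with
  | nil => intro pieces; simp
  | cons line rest ih =>
    intro pieces
    simp only [List.foldl_cons]
    rw [ih (pieces ++ [['\n']])]
    simp [List.length_cons, List.replicate_succ, List.append_assoc]

-- ===== VERDICT (by name: the statement is the Claim_ definition above) =====
-- match-shape bridge for the final results
theorem pvFinal (o : Option (List Int × List (List Char))) :
    (match Option.map (fun (s : List Int × List (List Char)) => (s.1, s.2.flatten)) o with
      | none => ""
      | some s => String.ofList s.2)
    = (match o with
      | none => ""
      | some st => String.ofList st.2.flatten) := by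
  cases o <;> rfl

-- ===== VERDICT (by name: the statement is the Claim_ definition above) =====
theorem stagger_join_spec : Claim_equal_stagger_join := by
  intro data parts _ hpre
  unfold Spec_stagger_join stagger_join stagger_join_alt
  dsimp only
  by_cases hp : parts = []
  · subst hp
    have hall : ∀ l ∈ data, l.toList.length = 0 := hpre.1 rfl
    have hA := pvNilCase data [] hall
    simp only [List.flatten_nil] at hA
    simp only [List.length_nil, List.replicate_zero]
    rw [hA]
    change String.ofList ((([] : List (List Char)) ++ List.replicate data.length ['\n']).flatten)
      = (match (data.foldl (fun (st : Option (List Int × List (List Char))) (_ : String) =>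
            match st with
            | none => none
            | some s => some (([] : List Int), s.2 ++ [['\n']]))
            (some (([] : List Int), ([] : List (List Char))))) with
        | none => ""
        | some st => String.ofList st.2.flatten)
    rw [pvNilB data []]
  · have hk : 0 < parts.length := by
      cases parts with
      | nil => exact absurd rfl hp
      | cons a l => simp
    have hrem0 : ∀ j < parts.length,
        (fun _ => 0) j + (data.map (fun l => pvCnt parts.length l.toList.length j)).sum ≤ pvLen parts j := by
      intro j hj
      have := hpre.2 j (List.mem_range.mpr hj)
      show 0 + (data.map (fun l => pvCnt parts.length l.toList.length j)).sum ≤ pvLen parts j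
      unfold pvLen
      omega
    have h := pvMain parts hk data (fun _ => 0) [] hrem0
    simp only [List.flatten_nil] at h
    rw [pvIdx_zero] at h
    rw [h, pvFinal]
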